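-- pv_equiv track=rewrite | github.com/YanSchw/ArtifactEngine | ArtifactSDK/HeaderTool/Properties.py | generate_property_type
-- ===== SOURCE A (Python) =====
-- SIMPLE_PROPERTY = """static {PROPERTY_TYPE} _Property_{PROPERTY_NAME} = {PROPERTY_TYPE}("{PROPERTY_NAME}", {OFFSET}{INITIALIZER});"""
--
-- ARRAY_GETSIZE = """
-- /* GetSize */
-- [](void* ptr) -> size_t {{
--     auto& arr = *reinterpret_cast<Array<{PROPERTY_TYPE}>*>(ptr);
--     return arr.Size();
-- }}
-- """
--
-- def generate_property_type(full_typename: str, prop_name: str, class_or_struct_typename: str, use_offset: bool = True) -> str: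
--     offset = f"offsetof({class_or_struct_typename}, {prop_name})" if use_offset else "0"
--
--     if full_typename == "uint8_t" or full_typename == "uint8":
--         return SIMPLE_PROPERTY.format(PROPERTY_TYPE="IntProperty", PROPERTY_NAME=prop_name, OFFSET=offset, INITIALIZER=", true, 8")
--     if full_typename == "uint16_t" or full_typename == "uint16":
--         return SIMPLE_PROPERTY.format(PROPERTY_TYPE="IntProperty", PROPERTY_NAME=prop_name, OFFSET=offset, INITIALIZER=", true, 16")
--     if full_typename == "uint32_t" or full_typename == "uint32":
--         return SIMPLE_PROPERTY.format(PROPERTY_TYPE="IntProperty", PROPERTY_NAME=prop_name, OFFSET=offset, INITIALIZER=", true, 32")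
--     if full_typename == "uint64_t" or full_typename == "uint64":
--         return SIMPLE_PROPERTY.format(PROPERTY_TYPE="IntProperty", PROPERTY_NAME=prop_name, OFFSET=offset, INITIALIZER=", true, 64")
--
--
--     if full_typename == "int8_t" or full_typename == "int8":
--         return SIMPLE_PROPERTY.format(PROPERTY_TYPE="IntProperty", PROPERTY_NAME=prop_name, OFFSET=offset, INITIALIZER=", false, 8")
--     if full_typename == "int16_t" or full_typename == "int16":
--         return SIMPLE_PROPERTY.format(PROPERTY_TYPE="IntProperty", PROPERTY_NAME=prop_name, OFFSET=offset, INITIALIZER=", false, 16")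
--     if full_typename == "int32_t" or full_typename == "int32":
--         return SIMPLE_PROPERTY.format(PROPERTY_TYPE="IntProperty", PROPERTY_NAME=prop_name, OFFSET=offset, INITIALIZER=", false, 32")
--     if full_typename == "int64_t" or full_typename == "int64":
--         return SIMPLE_PROPERTY.format(PROPERTY_TYPE="IntProperty", PROPERTY_NAME=prop_name, OFFSET=offset, INITIALIZER=", false, 64")
--
--
--     if full_typename == "float":
--         return SIMPLE_PROPERTY.format(PROPERTY_TYPE="FloatProperty", PROPERTY_NAME=prop_name, OFFSET=offset, INITIALIZER=", false")
--     if full_typename == "double":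
--         return SIMPLE_PROPERTY.format(PROPERTY_TYPE="FloatProperty", PROPERTY_NAME=prop_name, OFFSET=offset, INITIALIZER=", true")
--
--     if full_typename.startswith("SharedObjectPtr<") and full_typename.endswith(">"):
--         inner_type = full_typename[len("SharedObjectPtr<"):-1].strip()
--         return SIMPLE_PROPERTY.format(PROPERTY_TYPE="SharedObjectPtrProperty", PROPERTY_NAME=prop_name, OFFSET=offset, INITIALIZER=f', Class("{inner_type}")')
--
--     if full_typename.startswith("Array<") and full_typename.endswith(">"):
--         inner_type = full_typename[len("Array<"):-1].strip()
--         inner_type_str = generate_property_type(inner_type, prop_name + "_InnerArrayProperty", class_or_struct_typename, use_offset=False)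
--         return inner_type_str + "\n" + SIMPLE_PROPERTY.format(PROPERTY_TYPE="ArrayProperty", PROPERTY_NAME=prop_name, OFFSET=offset, INITIALIZER=f', &_Property_{prop_name}_InnerArrayProperty,{ARRAY_GETSIZE.format(PROPERTY_TYPE=inner_type)}')
--
--     raise NotImplementedError(f"Property type '{full_typename}' is not supported yet.")
-- ===== SOURCE B (Python) =====
-- SIMPLE_PROPERTY = """static {PROPERTY_TYPE} _Property_{PROPERTY_NAME} = {PROPERTY_TYPE}("{PROPERTY_NAME}", {OFFSET}{INITIALIZER});"""
--
-- ARRAY_GETSIZE = """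
-- /* GetSize */
-- [](void* ptr) -> size_t {{
--     auto& arr = *reinterpret_cast<Array<{PROPERTY_TYPE}>*>(ptr);
--     return arr.Size();
-- }}
-- """
--
-- def generate_property_type(full_typename: str, prop_name: str, class_or_struct_typename: str, use_offset: bool = True) -> str:
--     offset = f"offsetof({class_or_struct_typename}, {prop_name})" if use_offset else "0"
--
--     def emit(prop_type: str, initializer: str) -> str:
--         return f'static {prop_type} _Property_{prop_name} = {prop_type}("{prop_name}", {offset}{initializer});'
--
--     # Integer types: parse '[u]int{8,16,32,64}' with an optional trailing '_t'
--     # instead of sixteen separate equality checks.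
--     core = full_typename[:-2] if full_typename.endswith("_t") else full_typename
--     if core.startswith("uint"):
--         signed, bits = "true", core[4:]
--     elif core.startswith("int"):
--         signed, bits = "false", core[3:]
--     else:
--         signed, bits = None, ""
--     if signed is not None and bits in ("8", "16", "32", "64"):
--         return emit("IntProperty", f", {signed}, {bits}")
--
--     if full_typename == "float":
--         return emit("FloatProperty", ", false")
--     if full_typename == "double":
--         return emit("FloatProperty", ", true")
--
--     if full_typename.startswith("SharedObjectPtr<") and full_typename.endswith(">"):
--         inner_type = full_typename[len("SharedObjectPtr<"):-1].strip()
--         return emit("SharedObjectPtrProperty", f', Class("{inner_type}")')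
--
--     if full_typename.startswith("Array<") and full_typename.endswith(">"):
--         inner_type = full_typename[len("Array<"):-1].strip()
--         inner_type_str = generate_property_type(inner_type, prop_name + "_InnerArrayProperty", class_or_struct_typename, use_offset=False)
--         return inner_type_str + "\n" + emit("ArrayProperty", f', &_Property_{prop_name}_InnerArrayProperty,{ARRAY_GETSIZE.format(PROPERTY_TYPE=inner_type)}')
--
--     raise NotImplementedError(f"Property type '{full_typename}' is not supported yet.")
-- ===== Notes on version B (the rewrite author's own statement) =====
-- stated objective: simpler
-- what changed: The sixteen separate integer-typename equality checks are replaced by a single parse (strip an optional trailing '_t', split off a 'uint'/'int' prefix, validate the bit-width suffix against {8,16,32,64}); output formatting is done with one local emit helper instead of repeated template .format calls.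
import Mathlib
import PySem

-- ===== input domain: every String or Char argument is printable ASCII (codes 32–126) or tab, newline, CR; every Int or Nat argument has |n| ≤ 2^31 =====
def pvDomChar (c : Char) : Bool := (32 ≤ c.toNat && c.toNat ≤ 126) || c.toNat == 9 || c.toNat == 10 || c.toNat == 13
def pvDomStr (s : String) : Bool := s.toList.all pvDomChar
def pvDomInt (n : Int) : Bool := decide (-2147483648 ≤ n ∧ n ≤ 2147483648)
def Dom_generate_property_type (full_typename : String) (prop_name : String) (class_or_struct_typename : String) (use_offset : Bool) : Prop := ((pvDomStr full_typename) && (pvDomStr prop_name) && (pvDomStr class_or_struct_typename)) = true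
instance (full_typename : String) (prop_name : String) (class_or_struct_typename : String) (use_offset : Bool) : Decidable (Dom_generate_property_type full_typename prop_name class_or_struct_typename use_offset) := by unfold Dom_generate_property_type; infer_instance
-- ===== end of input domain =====

-- B replaces A's sixteen integer-name equality checks by one parse (strip a trailing "_t",
-- split off a "uint"/"int" prefix, check the bit-width suffix); objective: simpler.
-- Equivalence is about the RETURN value; neither program mutates its arguments.

-- ===== PORT A =====

-- SIMPLE_PROPERTY.format(...)
def pvFmtSimple (pt name off init : String) : String :=
  "static " ++ pt ++ " _Property_" ++ name ++ " = " ++ pt ++ "(\"" ++ name ++ "\", " ++ off ++ init ++ ");"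

-- ARRAY_GETSIZE.format(PROPERTY_TYPE=pt)  ({{ / }} are literal braces)
def pvArrayGetsize (pt : String) : String :=
  "\n/* GetSize */\n[](void* ptr) -> size_t {\n    auto& arr = *reinterpret_cast<Array<" ++ pt ++ ">*>(ptr);\n    return arr.Size();\n}\n"

-- termination: the stripped inner type of "Array<…>" is strictly shorter (proved below, cited by name)
theorem pvInnerLt (ft : String) (h : PySem.Str.endswith ft ">" = true) :
    (PySem.Str.strip (PySem.Str.slice ft (some 6) (some (-1)))).toList.length < ft.toList.length := by
  have hne : ft.toList ≠ [] := by
    have := (PySem.Str.endswith_eq ft ">") ▸ h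
    rw [PySem.Chars.endswith_iff] at this
    intro hnil; rw [hnil] at this; exact absurd (List.eq_nil_of_suffix_nil this) (by decide)
  have hlen : 1 ≤ ft.toList.length := by
    cases hl : ft.toList with
    | nil => exact absurd hl hne
    | cons a t => simp
  have hstrip : ∀ l : List Char, (PySem.Chars.strip l).length ≤ l.length := by
    intro l
    have h1 : (PySem.Chars.lstrip l).length ≤ l.length := by
      simp [PySem.Chars.lstrip]
      exact List.Sublist.length_le (List.dropWhile_sublist _)
    have h2 : (PySem.Chars.rstrip (PySem.Chars.lstrip l)).length ≤ (PySem.Chars.lstrip l).length := by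
      simp [PySem.Chars.rstrip]
      exact le_trans (List.Sublist.length_le (List.dropWhile_sublist _)) (by simp)
    exact le_trans h2 h1
  calc (PySem.Str.strip (PySem.Str.slice ft (some 6) (some (-1)))).toList.length
      ≤ (PySem.Str.slice ft (some 6) (some (-1))).toList.length := by
        rw [PySem.Str.toList_strip]; exact hstrip _
    _ < ft.toList.length := by
        rw [PySem.Str.toList_slice, PySem.Chars.slice_eq_listSlice, PySem.List.length_slice,
            PySem.List.clampIdx_neg_one]
        have := PySem.List.clampIdx_le ft.toList.length (6 : Int)
        omega

def generate_property_type (full_typename : String) (prop_name : String) (class_or_struct_typename : String) (use_offset : Bool) : String :=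
  let offset := if use_offset then "offsetof(" ++ class_or_struct_typename ++ ", " ++ prop_name ++ ")" else "0"
  if full_typename == "uint8_t" || full_typename == "uint8" then
    pvFmtSimple "IntProperty" prop_name offset ", true, 8"
  else if full_typename == "uint16_t" || full_typename == "uint16" then
    pvFmtSimple "IntProperty" prop_name offset ", true, 16"
  else if full_typename == "uint32_t" || full_typename == "uint32" then
    pvFmtSimple "IntProperty" prop_name offset ", true, 32"
  else if full_typename == "uint64_t" || full_typename == "uint64" then
    pvFmtSimple "IntProperty" prop_name offset ", true, 64"
  else if full_typename == "int8_t" || full_typename == "int8" then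
    pvFmtSimple "IntProperty" prop_name offset ", false, 8"
  else if full_typename == "int16_t" || full_typename == "int16" then
    pvFmtSimple "IntProperty" prop_name offset ", false, 16"
  else if full_typename == "int32_t" || full_typename == "int32" then
    pvFmtSimple "IntProperty" prop_name offset ", false, 32"
  else if full_typename == "int64_t" || full_typename == "int64" then
    pvFmtSimple "IntProperty" prop_name offset ", false, 64"
  else if full_typename == "float" then
    pvFmtSimple "FloatProperty" prop_name offset ", false"
  else if full_typename == "double" then
    pvFmtSimple "FloatProperty" prop_name offset ", true"
  else if PySem.Str.startswith full_typename "SharedObjectPtr<" && PySem.Str.endswith full_typename ">" then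
    let inner_type := PySem.Str.strip (PySem.Str.slice full_typename (some 16) (some (-1)))
    pvFmtSimple "SharedObjectPtrProperty" prop_name offset (", Class(\"" ++ inner_type ++ "\")")
  else if h : PySem.Str.startswith full_typename "Array<" && PySem.Str.endswith full_typename ">" then
    let inner_type := PySem.Str.strip (PySem.Str.slice full_typename (some 6) (some (-1)))
    let inner_type_str := generate_property_type inner_type (prop_name ++ "_InnerArrayProperty") class_or_struct_typename false
    inner_type_str ++ "\n" ++ pvFmtSimple "ArrayProperty" prop_name offset (", &_Property_" ++ prop_name ++ "_InnerArrayProperty," ++ pvArrayGetsize inner_type)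
  else
    ""  -- Python raises NotImplementedError here; excluded by Pre_
termination_by full_typename.toList.length
decreasing_by exact pvInnerLt full_typename (by simp at h; exact h.2)

-- ===== PORT B =====

def generate_property_type_alt (full_typename : String) (prop_name : String) (class_or_struct_typename : String) (use_offset : Bool) : String :=
  let offset := if use_offset then "offsetof(" ++ class_or_struct_typename ++ ", " ++ prop_name ++ ")" else "0"
  let emit := fun (pt init : String) =>
    "static " ++ pt ++ " _Property_" ++ prop_name ++ " = " ++ pt ++ "(\"" ++ prop_name ++ "\", " ++ offset ++ init ++ ");"
  -- core = full_typename[:-2] if it ends with "_t" else full_typename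
  let core := if PySem.Str.endswith full_typename "_t" then PySem.Str.slice full_typename none (some (-2)) else full_typename
  let parsed : Option String × String :=
    if PySem.Str.startswith core "uint" then (some "true", PySem.Str.slice core (some 4) none)
    else if PySem.Str.startswith core "int" then (some "false", PySem.Str.slice core (some 3) none)
    else (none, "")
  if parsed.1.isSome && (parsed.2 == "8" || parsed.2 == "16" || parsed.2 == "32" || parsed.2 == "64") then
    emit "IntProperty" (", " ++ parsed.1.getD "" ++ ", " ++ parsed.2)
  else if full_typename == "float" then
    emit "FloatProperty" ", false"
  else if full_typename == "double" then
    emit "FloatProperty" ", true"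
  else if PySem.Str.startswith full_typename "SharedObjectPtr<" && PySem.Str.endswith full_typename ">" then
    let inner_type := PySem.Str.strip (PySem.Str.slice full_typename (some 16) (some (-1)))
    emit "SharedObjectPtrProperty" (", Class(\"" ++ inner_type ++ "\")")
  else if h : PySem.Str.startswith full_typename "Array<" && PySem.Str.endswith full_typename ">" then
    let inner_type := PySem.Str.strip (PySem.Str.slice full_typename (some 6) (some (-1)))
    let inner_type_str := generate_property_type_alt inner_type (prop_name ++ "_InnerArrayProperty") class_or_struct_typename false
    inner_type_str ++ "\n" ++ emit "ArrayProperty" (", &_Property_" ++ prop_name ++ "_InnerArrayProperty," ++ pvArrayGetsize inner_type)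
  else
    ""  -- Python raises NotImplementedError here; excluded by Pre_
termination_by full_typename.toList.length
decreasing_by exact pvInnerLt full_typename (by simp at h; exact h.2)

-- ===== PRECONDITION & SPEC =====

-- Pre_ excludes exactly the inputs on which A raises NotImplementedError (and B raises the same);
-- the set of supported C++ type names is inherently recursive because of nested Array<…>.
def pvNames : List String :=
  ["uint8_t", "uint8", "uint16_t", "uint16", "uint32_t", "uint32", "uint64_t", "uint64",
   "int8_t", "int8", "int16_t", "int16", "int32_t", "int32", "int64_t", "int64",
   "float", "double"]

-- the supported-type grammar, fuelled by string length only so that `decide` can evaluate it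
def pvSupportedAux : Nat → String → Bool
  | 0, _ => false
  | fuel+1, ft =>
      pvNames.contains ft
      || (PySem.Str.startswith ft "SharedObjectPtr<" && PySem.Str.endswith ft ">")
      || (PySem.Str.startswith ft "Array<" && PySem.Str.endswith ft ">"
          && pvSupportedAux fuel (PySem.Str.strip (PySem.Str.slice ft (some 6) (some (-1)))))

def pvSupported (ft : String) : Bool := pvSupportedAux (ft.toList.length + 1) ft

def Pre_generate_property_type (full_typename : String) (prop_name : String) (class_or_struct_typename : String) (use_offset : Bool) : Prop :=
  pvSupported full_typename = true
instance (full_typename : String) (prop_name : String) (class_or_struct_typename : String) (use_offset : Bool) : Decidable (Pre_generate_property_type full_typename prop_name class_or_struct_typename use_offset) := by unfold Pre_generate_property_type; infer_instance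

def pvWitness_generate_property_type : String × String × String × Bool := ("Array<uint8_t>", "values", "MyStruct", true)

def Spec_generate_property_type (full_typename : String) (prop_name : String) (class_or_struct_typename : String) (use_offset : Bool) (out : String) : Prop := out = generate_property_type_alt full_typename prop_name class_or_struct_typename use_offset
instance (full_typename : String) (prop_name : String) (class_or_struct_typename : String) (use_offset : Bool) (out : String) : Decidable (Spec_generate_property_type full_typename prop_name class_or_struct_typename use_offset out) := by unfold Spec_generate_property_type; infer_instance

-- ===== CLAIM (what is proved, stated in full; the proofs are below) =====
def Claim_equal_generate_property_type : Prop := ∀ (full_typename : String) (prop_name : String) (class_or_struct_typename : String) (use_offset : Bool), Dom_generate_property_type full_typename prop_name class_or_struct_typename use_offset → Pre_generate_property_type full_typename prop_name class_or_struct_typename use_offset → Spec_generate_property_type full_typename prop_name class_or_struct_typename use_offset (generate_property_type full_typename prop_name class_or_struct_typename use_offset)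


-- ===== LEMMAS AND PROOFS =====

theorem pvWitness_ok : Dom_generate_property_type pvWitness_generate_property_type.1 pvWitness_generate_property_type.2.1 pvWitness_generate_property_type.2.2.1 pvWitness_generate_property_type.2.2.2 ∧ Pre_generate_property_type pvWitness_generate_property_type.1 pvWitness_generate_property_type.2.1 pvWitness_generate_property_type.2.2.1 pvWitness_generate_property_type.2.2.2 := by
  constructor <;> decide

theorem pvStartHead (s p : String) (c : Char) (h : PySem.Str.startswith s p = true)
    (hp : p.toList.head? = some c) : s.toList.head? = some c := by
  rw [PySem.Str.startswith_eq, PySem.Chars.startswith_iff] at h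
  obtain ⟨t, ht⟩ := h
  cases hpl : p.toList with
  | nil => rw [hpl] at hp; exact absurd hp (by simp)
  | cons a r => rw [hpl] at hp ht; rw [← ht]; simpa using hp

theorem pvStartFalse (s p : String) (c : Char) (hc : s.toList.head? = some c)
    (hne : p.toList.head? ≠ some c) (hp : p.toList ≠ []) : PySem.Str.startswith s p = false := by
  cases h : PySem.Str.startswith s p with
  | false => rfl
  | true =>
    exfalso
    cases hpl : p.toList with
    | nil => exact hp hpl
    | cons a r =>
      apply hne
      rw [hpl]
      have := pvStartHead s p a h (by rw [hpl]; rfl)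
      rw [this] at hc
      simpa using hc

theorem pvNeLit (s lit : String) (c : Char) (hc : s.toList.head? = some c)
    (h : lit.toList.head? ≠ some c) : (s == lit) = false := by
  apply beq_eq_false_iff_ne.mpr
  rintro rfl
  exact h hc

theorem pvCoreHead (s : String) (c : Char) (hc : s.toList.head? = some c) (hlen : 3 ≤ s.toList.length) :
    (if PySem.Str.endswith s "_t" = true then PySem.Str.slice s none (some (-2)) else s).toList.head? = some c := by
  obtain ⟨t, ht⟩ : ∃ t, s.toList = c :: t := by
    cases hl : s.toList with
    | nil => rw [hl] at hc; simp at hc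
    | cons a r => rw [hl] at hc; simp at hc; exact ⟨r, by rw [hc]⟩
  split
  · rw [PySem.Str.toList_slice, PySem.Chars.slice_eq_listSlice,
      PySem.List.slice_to_neg_ofNat s.toList 2 (by omega), ht]
    rw [ht] at hlen
    simp only [List.length_cons] at hlen
    have h2 : (c :: t).length - 2 = (t.length - 2) + 1 := by
      simp only [List.length_cons]; omega
    rw [h2, List.take_succ_cons]
    rfl
  · exact hc

theorem pvLit_0 (pn cn : String) (uo : Bool) :
    generate_property_type "uint8_t" pn cn uo = generate_property_type_alt "uint8_t" pn cn uo := by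
  rw [generate_property_type, generate_property_type_alt]
  simp only [show (if PySem.Str.endswith "uint8_t" "_t" = true then PySem.Str.slice "uint8_t" none (some (-2)) else "uint8_t") = "uint8" from by decide,
    show PySem.Str.startswith "uint8" "uint" = true from by decide,
    show PySem.Str.slice "uint8" (some 4) none = "8" from by decide,
    reduceIte, reduceDIte, reduceBEq, Bool.or_false, Bool.false_or, Bool.or_true, Bool.true_or, Bool.or_self, Option.isSome_some, Option.isSome_none, Bool.true_and, Bool.false_and, Bool.and_self, Option.getD_some, pvFmtSimple]
  cases uo <;> (apply String.toList_inj.mp; simp)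
theorem pvLit_1 (pn cn : String) (uo : Bool) :
    generate_property_type "uint8" pn cn uo = generate_property_type_alt "uint8" pn cn uo := by
  rw [generate_property_type, generate_property_type_alt]
  simp only [show (if PySem.Str.endswith "uint8" "_t" = true then PySem.Str.slice "uint8" none (some (-2)) else "uint8") = "uint8" from by decide,
    show PySem.Str.startswith "uint8" "uint" = true from by decide,
    show PySem.Str.slice "uint8" (some 4) none = "8" from by decide,
    reduceIte, reduceDIte, reduceBEq, Bool.or_false, Bool.false_or, Bool.or_true, Bool.true_or, Bool.or_self, Option.isSome_some, Option.isSome_none, Bool.true_and, Bool.false_and, Bool.and_self, Option.getD_some, pvFmtSimple]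
  cases uo <;> (apply String.toList_inj.mp; simp)
theorem pvLit_2 (pn cn : String) (uo : Bool) :
    generate_property_type "uint16_t" pn cn uo = generate_property_type_alt "uint16_t" pn cn uo := by
  rw [generate_property_type, generate_property_type_alt]
  simp only [show (if PySem.Str.endswith "uint16_t" "_t" = true then PySem.Str.slice "uint16_t" none (some (-2)) else "uint16_t") = "uint16" from by decide,
    show PySem.Str.startswith "uint16" "uint" = true from by decide,
    show PySem.Str.slice "uint16" (some 4) none = "16" from by decide,
    reduceIte, reduceDIte, reduceBEq, Bool.or_false, Bool.false_or, Bool.or_true, Bool.true_or, Bool.or_self, Option.isSome_some, Option.isSome_none, Bool.true_and, Bool.false_and, Bool.and_self, Option.getD_some, pvFmtSimple]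
  cases uo <;> (apply String.toList_inj.mp; simp)
theorem pvLit_3 (pn cn : String) (uo : Bool) :
    generate_property_type "uint16" pn cn uo = generate_property_type_alt "uint16" pn cn uo := by
  rw [generate_property_type, generate_property_type_alt]
  simp only [show (if PySem.Str.endswith "uint16" "_t" = true then PySem.Str.slice "uint16" none (some (-2)) else "uint16") = "uint16" from by decide,
    show PySem.Str.startswith "uint16" "uint" = true from by decide,
    show PySem.Str.slice "uint16" (some 4) none = "16" from by decide,
    reduceIte, reduceDIte, reduceBEq, Bool.or_false, Bool.false_or, Bool.or_true, Bool.true_or, Bool.or_self, Option.isSome_some, Option.isSome_none, Bool.true_and, Bool.false_and, Bool.and_self, Option.getD_some, pvFmtSimple]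
  cases uo <;> (apply String.toList_inj.mp; simp)
theorem pvLit_4 (pn cn : String) (uo : Bool) :
    generate_property_type "uint32_t" pn cn uo = generate_property_type_alt "uint32_t" pn cn uo := by
  rw [generate_property_type, generate_property_type_alt]
  simp only [show (if PySem.Str.endswith "uint32_t" "_t" = true then PySem.Str.slice "uint32_t" none (some (-2)) else "uint32_t") = "uint32" from by decide,
    show PySem.Str.startswith "uint32" "uint" = true from by decide,
    show PySem.Str.slice "uint32" (some 4) none = "32" from by decide,
    reduceIte, reduceDIte, reduceBEq, Bool.or_false, Bool.false_or, Bool.or_true, Bool.true_or, Bool.or_self, Option.isSome_some, Option.isSome_none, Bool.true_and, Bool.false_and, Bool.and_self, Option.getD_some, pvFmtSimple]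
  cases uo <;> (apply String.toList_inj.mp; simp)
theorem pvLit_5 (pn cn : String) (uo : Bool) :
    generate_property_type "uint32" pn cn uo = generate_property_type_alt "uint32" pn cn uo := by
  rw [generate_property_type, generate_property_type_alt]
  simp only [show (if PySem.Str.endswith "uint32" "_t" = true then PySem.Str.slice "uint32" none (some (-2)) else "uint32") = "uint32" from by decide,
    show PySem.Str.startswith "uint32" "uint" = true from by decide,
    show PySem.Str.slice "uint32" (some 4) none = "32" from by decide,
    reduceIte, reduceDIte, reduceBEq, Bool.or_false, Bool.false_or, Bool.or_true, Bool.true_or, Bool.or_self, Option.isSome_some, Option.isSome_none, Bool.true_and, Bool.false_and, Bool.and_self, Option.getD_some, pvFmtSimple]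
  cases uo <;> (apply String.toList_inj.mp; simp)
theorem pvLit_6 (pn cn : String) (uo : Bool) :
    generate_property_type "uint64_t" pn cn uo = generate_property_type_alt "uint64_t" pn cn uo := by
  rw [generate_property_type, generate_property_type_alt]
  simp only [show (if PySem.Str.endswith "uint64_t" "_t" = true then PySem.Str.slice "uint64_t" none (some (-2)) else "uint64_t") = "uint64" from by decide,
    show PySem.Str.startswith "uint64" "uint" = true from by decide,
    show PySem.Str.slice "uint64" (some 4) none = "64" from by decide,
    reduceIte, reduceDIte, reduceBEq, Bool.or_false, Bool.false_or, Bool.or_true, Bool.true_or, Bool.or_self, Option.isSome_some, Option.isSome_none, Bool.true_and, Bool.false_and, Bool.and_self, Option.getD_some, pvFmtSimple]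
  cases uo <;> (apply String.toList_inj.mp; simp)
theorem pvLit_7 (pn cn : String) (uo : Bool) :
    generate_property_type "uint64" pn cn uo = generate_property_type_alt "uint64" pn cn uo := by
  rw [generate_property_type, generate_property_type_alt]
  simp only [show (if PySem.Str.endswith "uint64" "_t" = true then PySem.Str.slice "uint64" none (some (-2)) else "uint64") = "uint64" from by decide,
    show PySem.Str.startswith "uint64" "uint" = true from by decide,
    show PySem.Str.slice "uint64" (some 4) none = "64" from by decide,
    reduceIte, reduceDIte, reduceBEq, Bool.or_false, Bool.false_or, Bool.or_true, Bool.true_or, Bool.or_self, Option.isSome_some, Option.isSome_none, Bool.true_and, Bool.false_and, Bool.and_self, Option.getD_some, pvFmtSimple]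
  cases uo <;> (apply String.toList_inj.mp; simp)
theorem pvLit_8 (pn cn : String) (uo : Bool) :
    generate_property_type "int8_t" pn cn uo = generate_property_type_alt "int8_t" pn cn uo := by
  rw [generate_property_type, generate_property_type_alt]
  simp only [show (if PySem.Str.endswith "int8_t" "_t" = true then PySem.Str.slice "int8_t" none (some (-2)) else "int8_t") = "int8" from by decide,
    show PySem.Str.startswith "int8" "uint" = false from by decide,
    show PySem.Str.startswith "int8" "int" = true from by decide,
    show PySem.Str.slice "int8" (some 3) none = "8" from by decide,
    reduceIte, reduceDIte, reduceBEq, Bool.or_false, Bool.false_or, Bool.or_true, Bool.true_or, Bool.or_self, Option.isSome_some, Option.isSome_none, Bool.true_and, Bool.false_and, Bool.and_self, Option.getD_some, pvFmtSimple]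
  cases uo <;> (apply String.toList_inj.mp; simp)
theorem pvLit_9 (pn cn : String) (uo : Bool) :
    generate_property_type "int8" pn cn uo = generate_property_type_alt "int8" pn cn uo := by
  rw [generate_property_type, generate_property_type_alt]
  simp only [show (if PySem.Str.endswith "int8" "_t" = true then PySem.Str.slice "int8" none (some (-2)) else "int8") = "int8" from by decide,
    show PySem.Str.startswith "int8" "uint" = false from by decide,
    show PySem.Str.startswith "int8" "int" = true from by decide,
    show PySem.Str.slice "int8" (some 3) none = "8" from by decide,
    reduceIte, reduceDIte, reduceBEq, Bool.or_false, Bool.false_or, Bool.or_true, Bool.true_or, Bool.or_self, Option.isSome_some, Option.isSome_none, Bool.true_and, Bool.false_and, Bool.and_self, Option.getD_some, pvFmtSimple]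
  cases uo <;> (apply String.toList_inj.mp; simp)
theorem pvLit_10 (pn cn : String) (uo : Bool) :
    generate_property_type "int16_t" pn cn uo = generate_property_type_alt "int16_t" pn cn uo := by
  rw [generate_property_type, generate_property_type_alt]
  simp only [show (if PySem.Str.endswith "int16_t" "_t" = true then PySem.Str.slice "int16_t" none (some (-2)) else "int16_t") = "int16" from by decide,
    show PySem.Str.startswith "int16" "uint" = false from by decide,
    show PySem.Str.startswith "int16" "int" = true from by decide,
    show PySem.Str.slice "int16" (some 3) none = "16" from by decide,
    reduceIte, reduceDIte, reduceBEq, Bool.or_false, Bool.false_or, Bool.or_true, Bool.true_or, Bool.or_self, Option.isSome_some, Option.isSome_none, Bool.true_and, Bool.false_and, Bool.and_self, Option.getD_some, pvFmtSimple]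
  cases uo <;> (apply String.toList_inj.mp; simp)
theorem pvLit_11 (pn cn : String) (uo : Bool) :
    generate_property_type "int16" pn cn uo = generate_property_type_alt "int16" pn cn uo := by
  rw [generate_property_type, generate_property_type_alt]
  simp only [show (if PySem.Str.endswith "int16" "_t" = true then PySem.Str.slice "int16" none (some (-2)) else "int16") = "int16" from by decide,
    show PySem.Str.startswith "int16" "uint" = false from by decide,
    show PySem.Str.startswith "int16" "int" = true from by decide,
    show PySem.Str.slice "int16" (some 3) none = "16" from by decide,
    reduceIte, reduceDIte, reduceBEq, Bool.or_false, Bool.false_or, Bool.or_true, Bool.true_or, Bool.or_self, Option.isSome_some, Option.isSome_none, Bool.true_and, Bool.false_and, Bool.and_self, Option.getD_some, pvFmtSimple]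
  cases uo <;> (apply String.toList_inj.mp; simp)
theorem pvLit_12 (pn cn : String) (uo : Bool) :
    generate_property_type "int32_t" pn cn uo = generate_property_type_alt "int32_t" pn cn uo := by
  rw [generate_property_type, generate_property_type_alt]
  simp only [show (if PySem.Str.endswith "int32_t" "_t" = true then PySem.Str.slice "int32_t" none (some (-2)) else "int32_t") = "int32" from by decide,
    show PySem.Str.startswith "int32" "uint" = false from by decide,
    show PySem.Str.startswith "int32" "int" = true from by decide,
    show PySem.Str.slice "int32" (some 3) none = "32" from by decide,
    reduceIte, reduceDIte, reduceBEq, Bool.or_false, Bool.false_or, Bool.or_true, Bool.true_or, Bool.or_self, Option.isSome_some, Option.isSome_none, Bool.true_and, Bool.false_and, Bool.and_self, Option.getD_some, pvFmtSimple]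
  cases uo <;> (apply String.toList_inj.mp; simp)
theorem pvLit_13 (pn cn : String) (uo : Bool) :
    generate_property_type "int32" pn cn uo = generate_property_type_alt "int32" pn cn uo := by
  rw [generate_property_type, generate_property_type_alt]
  simp only [show (if PySem.Str.endswith "int32" "_t" = true then PySem.Str.slice "int32" none (some (-2)) else "int32") = "int32" from by decide,
    show PySem.Str.startswith "int32" "uint" = false from by decide,
    show PySem.Str.startswith "int32" "int" = true from by decide,
    show PySem.Str.slice "int32" (some 3) none = "32" from by decide,
    reduceIte, reduceDIte, reduceBEq, Bool.or_false, Bool.false_or, Bool.or_true, Bool.true_or, Bool.or_self, Option.isSome_some, Option.isSome_none, Bool.true_and, Bool.false_and, Bool.and_self, Option.getD_some, pvFmtSimple]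
  cases uo <;> (apply String.toList_inj.mp; simp)
theorem pvLit_14 (pn cn : String) (uo : Bool) :
    generate_property_type "int64_t" pn cn uo = generate_property_type_alt "int64_t" pn cn uo := by
  rw [generate_property_type, generate_property_type_alt]
  simp only [show (if PySem.Str.endswith "int64_t" "_t" = true then PySem.Str.slice "int64_t" none (some (-2)) else "int64_t") = "int64" from by decide,
    show PySem.Str.startswith "int64" "uint" = false from by decide,
    show PySem.Str.startswith "int64" "int" = true from by decide,
    show PySem.Str.slice "int64" (some 3) none = "64" from by decide,
    reduceIte, reduceDIte, reduceBEq, Bool.or_false, Bool.false_or, Bool.or_true, Bool.true_or, Bool.or_self, Option.isSome_some, Option.isSome_none, Bool.true_and, Bool.false_and, Bool.and_self, Option.getD_some, pvFmtSimple]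
  cases uo <;> (apply String.toList_inj.mp; simp)
theorem pvLit_15 (pn cn : String) (uo : Bool) :
    generate_property_type "int64" pn cn uo = generate_property_type_alt "int64" pn cn uo := by
  rw [generate_property_type, generate_property_type_alt]
  simp only [show (if PySem.Str.endswith "int64" "_t" = true then PySem.Str.slice "int64" none (some (-2)) else "int64") = "int64" from by decide,
    show PySem.Str.startswith "int64" "uint" = false from by decide,
    show PySem.Str.startswith "int64" "int" = true from by decide,
    show PySem.Str.slice "int64" (some 3) none = "64" from by decide,
    reduceIte, reduceDIte, reduceBEq, Bool.or_false, Bool.false_or, Bool.or_true, Bool.true_or, Bool.or_self, Option.isSome_some, Option.isSome_none, Bool.true_and, Bool.false_and, Bool.and_self, Option.getD_some, pvFmtSimple]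
  cases uo <;> (apply String.toList_inj.mp; simp)
theorem pvLit_16 (pn cn : String) (uo : Bool) :
    generate_property_type "float" pn cn uo = generate_property_type_alt "float" pn cn uo := by
  rw [generate_property_type, generate_property_type_alt]
  simp only [show (if PySem.Str.endswith "float" "_t" = true then PySem.Str.slice "float" none (some (-2)) else "float") = "float" from by decide,
    show PySem.Str.startswith "float" "uint" = false from by decide,
    show PySem.Str.startswith "float" "int" = false from by decide,
    reduceIte, reduceDIte, reduceBEq, Bool.or_false, Bool.false_or, Bool.or_true, Bool.true_or, Bool.or_self, Option.isSome_some, Option.isSome_none, Bool.true_and, Bool.false_and, Bool.and_self, Option.getD_some, pvFmtSimple]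
  cases uo <;> (apply String.toList_inj.mp; simp)
theorem pvLit_17 (pn cn : String) (uo : Bool) :
    generate_property_type "double" pn cn uo = generate_property_type_alt "double" pn cn uo := by
  rw [generate_property_type, generate_property_type_alt]
  simp only [show (if PySem.Str.endswith "double" "_t" = true then PySem.Str.slice "double" none (some (-2)) else "double") = "double" from by decide,
    show PySem.Str.startswith "double" "uint" = false from by decide,
    show PySem.Str.startswith "double" "int" = false from by decide,
    reduceIte, reduceDIte, reduceBEq, Bool.or_false, Bool.false_or, Bool.or_true, Bool.true_or, Bool.or_self, Option.isSome_some, Option.isSome_none, Bool.true_and, Bool.false_and, Bool.and_self, Option.getD_some, pvFmtSimple]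
  cases uo <;> (apply String.toList_inj.mp; simp)

theorem pvSOP (ft pn cn : String) (uo : Bool)
    (hs : PySem.Str.startswith ft "SharedObjectPtr<" = true)
    (he : PySem.Str.endswith ft ">" = true) :
    generate_property_type ft pn cn uo = generate_property_type_alt ft pn cn uo := by
  have hS : ft.toList.head? = some 'S' := pvStartHead ft _ 'S' hs (by decide)
  have hlen : 3 ≤ ft.toList.length := by
    have hle := List.IsPrefix.length_le ((PySem.Chars.startswith_iff _ _).mp ((PySem.Str.startswith_eq ft "SharedObjectPtr<") ▸ hs))
    have hn : ("SharedObjectPtr<").toList.length = 16 := by decide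
    omega
  have hch := pvCoreHead ft 'S' hS hlen
  rw [generate_property_type, generate_property_type_alt]
  simp only [pvNeLit ft "uint8_t" 'S' hS (by decide),
    pvNeLit ft "uint8" 'S' hS (by decide),
    pvNeLit ft "uint16_t" 'S' hS (by decide),
    pvNeLit ft "uint16" 'S' hS (by decide),
    pvNeLit ft "uint32_t" 'S' hS (by decide),
    pvNeLit ft "uint32" 'S' hS (by decide),
    pvNeLit ft "uint64_t" 'S' hS (by decide),
    pvNeLit ft "uint64" 'S' hS (by decide),
    pvNeLit ft "int8_t" 'S' hS (by decide),
    pvNeLit ft "int8" 'S' hS (by decide),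
    pvNeLit ft "int16_t" 'S' hS (by decide),
    pvNeLit ft "int16" 'S' hS (by decide),
    pvNeLit ft "int32_t" 'S' hS (by decide),
    pvNeLit ft "int32" 'S' hS (by decide),
    pvNeLit ft "int64_t" 'S' hS (by decide),
    pvNeLit ft "int64" 'S' hS (by decide),
    pvNeLit ft "float" 'S' hS (by decide),
    pvNeLit ft "double" 'S' hS (by decide),
    pvStartFalse _ "uint" 'S' hch (by decide) (by decide),
    pvStartFalse _ "int" 'S' hch (by decide) (by decide),
    hs, he,
    reduceIte, reduceDIte, reduceBEq, Bool.or_false, Bool.false_or, Bool.or_true, Bool.true_or, Bool.or_self, Option.isSome_some, Option.isSome_none, Bool.true_and, Bool.false_and, Bool.and_self, Option.getD_some, pvFmtSimple]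
  cases uo <;> (apply String.toList_inj.mp; simp)

theorem pvArr (ft pn cn : String) (uo : Bool)
    (hs : PySem.Str.startswith ft "Array<" = true)
    (he : PySem.Str.endswith ft ">" = true)
    (hrec : generate_property_type (PySem.Str.strip (PySem.Str.slice ft (some 6) (some (-1)))) (pn ++ "_InnerArrayProperty") cn false = generate_property_type_alt (PySem.Str.strip (PySem.Str.slice ft (some 6) (some (-1)))) (pn ++ "_InnerArrayProperty") cn false) :
    generate_property_type ft pn cn uo = generate_property_type_alt ft pn cn uo := by
  have hA : ft.toList.head? = some 'A' := pvStartHead ft _ 'A' hs (by decide)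
  have hlen : 3 ≤ ft.toList.length := by
    have hle := List.IsPrefix.length_le ((PySem.Chars.startswith_iff _ _).mp ((PySem.Str.startswith_eq ft "Array<") ▸ hs))
    have hn : ("Array<").toList.length = 6 := by decide
    omega
  have hch := pvCoreHead ft 'A' hA hlen
  rw [generate_property_type, generate_property_type_alt]
  simp only [pvNeLit ft "uint8_t" 'A' hA (by decide),
    pvNeLit ft "uint8" 'A' hA (by decide),
    pvNeLit ft "uint16_t" 'A' hA (by decide),
    pvNeLit ft "uint16" 'A' hA (by decide),
    pvNeLit ft "uint32_t" 'A' hA (by decide),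
    pvNeLit ft "uint32" 'A' hA (by decide),
    pvNeLit ft "uint64_t" 'A' hA (by decide),
    pvNeLit ft "uint64" 'A' hA (by decide),
    pvNeLit ft "int8_t" 'A' hA (by decide),
    pvNeLit ft "int8" 'A' hA (by decide),
    pvNeLit ft "int16_t" 'A' hA (by decide),
    pvNeLit ft "int16" 'A' hA (by decide),
    pvNeLit ft "int32_t" 'A' hA (by decide),
    pvNeLit ft "int32" 'A' hA (by decide),
    pvNeLit ft "int64_t" 'A' hA (by decide),
    pvNeLit ft "int64" 'A' hA (by decide),
    pvNeLit ft "float" 'A' hA (by decide),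
    pvNeLit ft "double" 'A' hA (by decide),
    pvStartFalse _ "uint" 'A' hch (by decide) (by decide),
    pvStartFalse _ "int" 'A' hch (by decide) (by decide),
    pvStartFalse ft "SharedObjectPtr<" 'A' hA (by decide) (by decide),
    hs, he,
    reduceIte, reduceDIte, reduceBEq, Bool.or_false, Bool.false_or, Bool.or_true, Bool.true_or, Bool.or_self, Option.isSome_some, Option.isSome_none, Bool.true_and, Bool.false_and, Bool.and_self, Option.getD_some, pvFmtSimple]
  rw [hrec]
  cases uo <;> (apply String.toList_inj.mp; simp)

theorem pvMainAux : ∀ (fuel : Nat) (ft pn cn : String) (uo : Bool), pvSupportedAux fuel ft = true → generate_property_type ft pn cn uo = generate_property_type_alt ft pn cn uo := by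
  intro fuel
  induction fuel with
  | zero => intro ft pn cn uo h; simp [pvSupportedAux] at h
  | succ n ih =>
    intro ft pn cn uo h
    simp only [pvSupportedAux, Bool.or_eq_true, Bool.and_eq_true] at h
    rcases h with (hmem | ⟨hs, he⟩) | ⟨⟨hs, he⟩, hx⟩
    · have hmem' : ft = "uint8_t" ∨ ft = "uint8" ∨ ft = "uint16_t" ∨ ft = "uint16" ∨ ft = "uint32_t" ∨ ft = "uint32" ∨ ft = "uint64_t" ∨ ft = "uint64" ∨ ft = "int8_t" ∨ ft = "int8" ∨ ft = "int16_t" ∨ ft = "int16" ∨ ft = "int32_t" ∨ ft = "int32" ∨ ft = "int64_t" ∨ ft = "int64" ∨ ft = "float" ∨ ft = "double" := by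
        simpa [pvNames] using hmem
      rcases hmem' with rfl|rfl|rfl|rfl|rfl|rfl|rfl|rfl|rfl|rfl|rfl|rfl|rfl|rfl|rfl|rfl|rfl|rfl
      · exact pvLit_0 pn cn uo
      · exact pvLit_1 pn cn uo
      · exact pvLit_2 pn cn uo
      · exact pvLit_3 pn cn uo
      · exact pvLit_4 pn cn uo
      · exact pvLit_5 pn cn uo
      · exact pvLit_6 pn cn uo
      · exact pvLit_7 pn cn uo
      · exact pvLit_8 pn cn uo
      · exact pvLit_9 pn cn uo
      · exact pvLit_10 pn cn uo
      · exact pvLit_11 pn cn uo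
      · exact pvLit_12 pn cn uo
      · exact pvLit_13 pn cn uo
      · exact pvLit_14 pn cn uo
      · exact pvLit_15 pn cn uo
      · exact pvLit_16 pn cn uo
      · exact pvLit_17 pn cn uo
    · exact pvSOP ft pn cn uo hs he
    · exact pvArr ft pn cn uo hs he (ih _ _ _ _ hx)

-- ===== VERDICT (by name: the statement is the Claim_ definition above) =====
theorem generate_property_type_spec : Claim_equal_generate_property_type := by
  intro ft pn cn uo _ hpre
  exact pvMainAux (ft.toList.length + 1) ft pn cn uo hpre
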